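-- pv_equiv track=rewrite | github.com/silverain02/codingtest | ch13dfs_bfs문제/18_괄호 변환.py | trans_to_cor
-- ===== SOURCE A (Python) =====
-- def ck_correct(s):
--     #문자열 순회
--     s2 = ''
--     for i in range(len(s)):
--         if s[i] == '(':
--             s2 += s[i]
--         #괄호 닫히면 괄호 한쌍 제거
--         elif len(s2)!=0:
--             s2 = s2[:-1]
--     #전체 삭제된 경우 올바른 문자열
--     if len(s2) == 0:
--         return True
--     return False
--
-- def ck_empty(s):
--     if len(s) == 0:
--         return True
--     else:
--         return False
--
-- def reverse(s):
--     result = ''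
--     for i in range(len(s)):
--         if s[i] == '(':
--             result += ')'
--         else:
--             result += '('
--     return result
--
-- def trans_to_cor(w):
--     #빈 문자열 판단
--     if ck_empty(w):
--         return w
--     else:
--         #문자열을 균형잡힌 문자열 두개로 자르는 지점 저장
--         spr_pnt = []
--         cnt = 0
--         for i in range(len(w)):
--             if w[i] == '(':
--                 cnt += 1
--             elif w[i] == ')':
--                 cnt -= 1
--             if cnt == 0:
--                 spr_pnt.append(i+1)
--         # 문자열 분리
--         for pnt in spr_pnt:
--             u = w[:pnt]
--             v = w[pnt:]
--             #u가 올바른 문자열이면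
--             if ck_correct(u):
--                 #v 변환 후 합치기
--                 return u + trans_to_cor(v)
--             #u가 올바른 문자열이 아니라면
--             else:
--                 temp = '(' + trans_to_cor(v) +')'
--                 u = u[1:len(u)-1]
--                 u = reverse(u)
--                 temp += u
--                 return temp
-- ===== SOURCE B (Python) =====
-- def trans_to_cor(w):
--     # One pass to split w into minimal balanced chunks (cut whenever the
--     # running balance returns to 0), then combine the chunks right-to-left.
--     chunks = []
--     cur = []
--     bal = 0
--     for c in w:
--         cur.append(c)
--         if c == '(':
--             bal += 1
--         elif c == ')':
--             bal -= 1
--         if bal == 0: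
--             chunks.append(''.join(cur))
--             cur = []
--     if cur:
--         raise ValueError("w does not decompose into balanced chunks")
--     acc = ''
--     for ch in reversed(chunks):
--         if ch.startswith(')'):
--             acc = '(' + acc + ')' + ''.join(')' if x == '(' else '(' for x in ch[1:-1])
--         else:
--             acc = ch + acc
--     return acc
-- ===== Notes on version B (the rewrite author's own statement) =====
-- stated objective: faster
-- what changed: Replaces A's suffix recursion (re-scanning each suffix for all split points and re-checking correctness with a clamped stack) by a single chunking pass that cuts at every zero of the running balance, followed by a right-to-left fold over the chunk list whose branch tests only the chunk's first character (a minimal balanced chunk is correct iff it does not start with ')').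
-- outside the precondition, e.g. on trans_to_cor('('): A returns None, B raises ValueError; on trans_to_cor(')'): A returns None, B raises ValueError; on trans_to_cor('()('): A raises TypeError, B raises ValueError
import Mathlib
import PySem

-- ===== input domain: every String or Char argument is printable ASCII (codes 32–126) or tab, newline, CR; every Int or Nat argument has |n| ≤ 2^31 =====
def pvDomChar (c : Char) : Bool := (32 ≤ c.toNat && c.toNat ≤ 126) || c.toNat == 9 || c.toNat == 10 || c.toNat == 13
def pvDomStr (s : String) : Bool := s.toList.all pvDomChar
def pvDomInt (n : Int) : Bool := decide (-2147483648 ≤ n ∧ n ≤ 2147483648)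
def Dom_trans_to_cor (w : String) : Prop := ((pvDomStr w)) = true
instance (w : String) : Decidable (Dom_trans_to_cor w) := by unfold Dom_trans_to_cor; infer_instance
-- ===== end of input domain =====

-- B is an alternative decomposition: one chunking pass plus a right-to-left fold, instead of A's suffix recursion.
-- Pre_ excludes inputs with unequal '(' / ')' counts, where A returns None or raises TypeError (no string value to match).

-- ===== PORT A =====

-- per-character paren weight; (pcnt-mapped sum = 0) = equal numbers of '(' and ')'
def pcnt (c : Char) : Int := if c = '(' then 1 else if c = ')' then -1 else 0

def balOf (l : List Char) : Int := (l.map pcnt).sum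


-- ck_correct: the clamped-stack check (any non-'(' character pops when the stack is nonempty)
def ckStep (s2 : List Char) (c : Char) : List Char :=
  if c = '(' then s2 ++ [c] else if s2.length ≠ 0 then s2.dropLast else s2

def ckCorrect (s : List Char) : Bool := (s.foldl ckStep []).length = 0

-- reverse(s): flips every character ('(' -> ')', anything else -> '(')
def aReverse (s : List Char) : List Char :=
  s.foldl (fun r c => r ++ [if c = '(' then ')' else '(']) []

-- the spr_pnt loop: cut points i+1 where the running count hits 0
def aCuts : List Char → Int → Nat → List Nat
  | [], _, _ => []
  | c :: rest, cnt, i =>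
    let cnt' := if c = '(' then cnt + 1 else if c = ')' then cnt - 1 else cnt
    if cnt' = 0 then (i + 1) :: aCuts rest cnt' (i + 1) else aCuts rest cnt' (i + 1)

-- the running count in aCuts is cnt + pcnt c
theorem cnt_step (cnt : Int) (c : Char) :
    (if c = '(' then cnt + 1 else if c = ')' then cnt - 1 else cnt) = cnt + pcnt c := by
  simp only [pcnt]; split_ifs <;> omega

theorem aCuts_lt : ∀ (l : List Char) (cnt : Int) (i : Nat), ∀ p ∈ aCuts l cnt i, i < p := by
  intro l
  induction l with
  | nil => intro cnt i p hp; simp [aCuts] at hp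
  | cons c rest ih =>
    intro cnt i p hp
    simp only [aCuts, cnt_step] at hp
    split at hp
    · rcases List.mem_cons.1 hp with h | h
      · omega
      · have := ih _ _ _ h; omega
    · have := ih _ _ _ hp; omega

-- trans_to_cor: only the first element of spr_pnt is ever used (both branches return)
def aTransL (l : List Char) : List Char :=
  if l = [] then l
  else
    match h : aCuts l 0 0 with
    | [] => []  -- Python falls off the loop and returns None; excluded by Pre_
    | p :: _ =>
      let u := l.take p
      let v := l.drop p
      if ckCorrect u then u ++ aTransL v
      else ('(' :: aTransL v ++ [')']) ++ aReverse ((u.drop 1).dropLast)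
termination_by l.length
decreasing_by
  all_goals
    have hp : 0 < p := aCuts_lt l 0 0 p (h ▸ List.mem_cons_self ..)
    have hl : l ≠ [] := by assumption
    have : 0 < l.length := List.length_pos_iff.2 hl
    simp only [List.length_drop]
    omega

def trans_to_cor (w : String) : String := String.mk (aTransL w.toList)

-- ===== PORT B =====

def flipChar (c : Char) : Char := if c = '(' then ')' else '('

-- one pass: cut a chunk whenever the running balance returns to zero
def bChunks : List Char → Int → List Char → List (List Char)
  | [], _, _ => []
  | c :: rest, bal, cur =>
    let cur' := cur ++ [c]
    let bal' := if c = '(' then bal + 1 else if c = ')' then bal - 1 else bal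
    if bal' = 0 then cur' :: bChunks rest 0 [] else bChunks rest bal' cur'

-- combining step (applied right-to-left via foldr, as reversed(chunks) in Source B)
def bStep (ch : List Char) (acc : List Char) : List Char :=
  if ch.head? = some ')' then
    '(' :: acc ++ ')' :: ((ch.drop 1).dropLast).map flipChar
  else ch ++ acc

def trans_to_cor_alt (w : String) : String :=
  String.mk ((bChunks w.toList 0 []).foldr bStep [])

-- ===== PRECONDITION & SPEC =====

-- Pre_ excludes strings whose '(' and ')' counts differ: there A returns None (not a string) or raises TypeError.
def Pre_trans_to_cor (w : String) : Prop := balOf w.toList = 0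
instance (w : String) : Decidable (Pre_trans_to_cor w) := by unfold Pre_trans_to_cor; infer_instance

def pvWitness_trans_to_cor : String := "()"

def Spec_trans_to_cor (w : String) (out : String) : Prop := out = trans_to_cor_alt w
instance (w : String) (out : String) : Decidable (Spec_trans_to_cor w out) := by unfold Spec_trans_to_cor; infer_instance

-- ===== CLAIM (what is proved, stated in full; the proofs are below) =====
def Claim_equal_trans_to_cor : Prop := ∀ (w : String), Dom_trans_to_cor w → Pre_trans_to_cor w → Spec_trans_to_cor w (trans_to_cor w)

-- ===== LEMMAS AND PROOFS =====

theorem balOf_append (a b : List Char) : balOf (a ++ b) = balOf a + balOf b := by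
  simp [balOf]

theorem balOf_take_succ (l : List Char) (j : Nat) (hj : j < l.length) :
    balOf (l.take (j + 1)) = balOf (l.take j) + pcnt l[j] := by
  rw [List.take_succ, balOf_append]
  simp [balOf, List.getElem?_eq_getElem hj]

-- aCuts nonempty on a nonempty balanced segment
theorem aCuts_ne_nil : ∀ (l : List Char) (cnt : Int) (i : Nat),
    l ≠ [] → cnt + balOf l = 0 → aCuts l cnt i ≠ [] := by
  intro l
  induction l with
  | nil => intro _ _ h; exact absurd rfl h
  | cons c rest ih =>
    intro cnt i _ hbal
    simp only [aCuts, cnt_step]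
    split
    · simp
    · rename_i hne
      rcases List.eq_nil_or_concat rest with h | _
      · subst h
        have hb : balOf [c] = pcnt c := by simp [balOf]
        rw [show balOf (c :: []) = pcnt c from hb] at hbal
        simp [hbal] at hne
      · apply ih
        · rename_i h; rcases h with ⟨ys, y, rfl⟩; simp
        · have : balOf (c :: rest) = pcnt c + balOf rest := by simp [balOf]
          omega

-- head cut: position, balance zero, and minimality
theorem aCuts_head_spec : ∀ (l : List Char) (cnt : Int) (i p : Nat) (tl : List Nat),
    aCuts l cnt i = p :: tl →
    i < p ∧ p - i ≤ l.length ∧ cnt + balOf (l.take (p - i)) = 0 ∧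
      ∀ j, 1 ≤ j → j < p - i → cnt + balOf (l.take j) ≠ 0 := by
  intro l
  induction l with
  | nil => intro cnt i p tl h; simp [aCuts] at h
  | cons c rest ih =>
    intro cnt i p tl h
    simp only [aCuts, cnt_step] at h
    split at h
    · rename_i h0
      rw [List.cons.injEq] at h
      obtain ⟨rfl, rfl⟩ : p = i + 1 ∧ tl = aCuts rest (cnt + pcnt c) (i + 1) :=
        ⟨h.1.symm, h.2.symm⟩
      refine ⟨by omega, by simp, ?_, ?_⟩
      · simpa [balOf] using h0
      · intro j h1 h2; omega
    · rename_i h0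
      obtain ⟨hlt, hle, hbal, hmin⟩ := ih (cnt + pcnt c) (i + 1) p tl h
      have hpi : p - i = (p - (i + 1)) + 1 := by omega
      refine ⟨by omega, ?_, ?_, ?_⟩
      · simp; omega
      · rw [hpi]; simpa [balOf, add_assoc] using hbal
      · intro j h1 h2
        match j with
        | 1 => simpa [balOf] using h0
        | Nat.succ (Nat.succ k) =>
          have := hmin (k + 1) (by omega) (by omega)
          simpa [balOf, add_assoc] using this

-- chunk split: bChunks follows the first cut of aCuts
theorem bChunks_split : ∀ (l : List Char) (cnt : Int) (i p : Nat) (tl : List Nat) (cur : List Char),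
    aCuts l cnt i = p :: tl →
    bChunks l cnt cur = (cur ++ l.take (p - i)) :: bChunks (l.drop (p - i)) 0 [] := by
  intro l
  induction l with
  | nil => intro cnt i p tl cur h; simp [aCuts] at h
  | cons c rest ih =>
    intro cnt i p tl cur h
    simp only [aCuts, cnt_step] at h
    simp only [bChunks, cnt_step]
    split at h
    · rename_i h0
      rw [List.cons.injEq] at h
      obtain ⟨hp, -⟩ := h
      subst hp
      simp [h0, List.take_succ]
    · rename_i h0
      have hlt : i + 1 < p := (aCuts_head_spec rest _ _ _ _ h).1
      have hpi : p - i = (p - (i + 1)) + 1 := by omega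
      rw [if_neg h0, ih _ _ _ _ _ h, hpi]
      simp [List.take_succ_cons]

-- sign propagation: nonzero intermediate counts keep their sign
theorem chunkSign_pos (p : Nat) (f : Nat → Int) (h1 : f 1 = 1)
    (hstep : ∀ j, j + 1 ≤ p → f (j + 1) ≤ f j + 1 ∧ f j - 1 ≤ f (j + 1))
    (hne : ∀ j, 1 ≤ j → j < p → f j ≠ 0) :
    ∀ j, 1 ≤ j → j < p → 1 ≤ f j := by
  intro j
  induction j with
  | zero => omega
  | succ k ihk =>
    intro _ hk
    match k with
    | 0 => simpa using h1.ge
    | Nat.succ m =>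
      show 1 ≤ f (m + 2)
      have hk' : m + 2 < p := hk
      have hfk : 1 ≤ f (m + 1) := ihk (by omega) (by omega)
      have hs := (hstep (m + 1) (by omega)).2
      have e : f (m + 1 + 1) = f (m + 2) := rfl
      have hn := hne (m + 2) (by omega) hk'
      omega

theorem chunkSign_neg (p : Nat) (f : Nat → Int) (h1 : f 1 = -1)
    (hstep : ∀ j, j + 1 ≤ p → f (j + 1) ≤ f j + 1 ∧ f j - 1 ≤ f (j + 1))
    (hne : ∀ j, 1 ≤ j → j < p → f j ≠ 0) :
    ∀ j, 1 ≤ j → j < p → f j ≤ -1 := by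
  intro j
  induction j with
  | zero => omega
  | succ k ihk =>
    intro _ hk
    match k with
    | 0 => simpa using h1.le
    | Nat.succ m =>
      show f (m + 2) ≤ -1
      have hk' : m + 2 < p := hk
      have hfk : f (m + 1) ≤ -1 := ihk (by omega) (by omega)
      have hs := (hstep (m + 1) (by omega)).1
      have e : f (m + 1 + 1) = f (m + 2) := rfl
      have hn := hne (m + 2) (by omega) hk'
      omega

-- clamped-stack bound: under nonnegative prefix balances the stack stays below off + balance
theorem ckStack_le : ∀ (s : List Char) (s2 : List Char) (off : Int),
    (s2.length : Int) ≤ off →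
    (∀ j, j ≤ s.length → 0 ≤ off + balOf (s.take j)) →
    ((s.foldl ckStep s2).length : Int) ≤ off + balOf s := by
  intro s
  induction s with
  | nil => intro s2 off h _; simpa [balOf] using h
  | cons c rest ih =>
    intro s2 off hlen hpre
    have hbal : balOf (c :: rest) = pcnt c + balOf rest := by simp [balOf]
    have hpc : pcnt c ≤ 1 ∧ -1 ≤ pcnt c := by simp only [pcnt]; split_ifs <;> omega
    have key : ((ckStep s2 c).length : Int) ≤ off + pcnt c := by
      by_cases h1 : c = '('
      · have : pcnt c = 1 := by simp [pcnt, h1]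
        simp only [ckStep, if_pos h1, List.length_append, List.length_singleton]
        push_cast; omega
      · by_cases h2 : s2 = []
        · have h01 := hpre 1 (by simp)
          rw [List.take_succ_cons, List.take_zero] at h01
          have hb : balOf [c] = pcnt c := by simp [balOf]
          rw [show balOf (c :: []) = pcnt c from hb] at h01
          simp [ckStep, h1, h2]
          omega
        · have hlen1 : 1 ≤ s2.length := List.length_pos_iff.2 h2
          simp only [ckStep, if_neg h1, ne_eq]
          rw [if_pos (by omega)]
          rw [List.length_dropLast, Nat.cast_sub hlen1]
          push_cast; omega
    rw [List.foldl_cons, hbal]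
    have := ih (ckStep s2 c) (off + pcnt c) key (by
      intro j hj
      have := hpre (j + 1) (by simpa using Nat.succ_le_succ hj)
      simpa [balOf, List.take_succ_cons, add_assoc] using this)
    omega

-- ckCorrect is true when the balance is zero and never dips negative
theorem ckCorrect_of_nonneg (u : List Char) (hbal : balOf u = 0)
    (hpre : ∀ j, j ≤ u.length → 0 ≤ balOf (u.take j)) : ckCorrect u = true := by
  have := ckStack_le u [] 0 (by simp) (by simpa using hpre)
  simp only [ckCorrect]
  have : (u.foldl ckStep []).length = 0 := by omega
  simp [this]

-- ckCorrect is false when the string ends with '('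
theorem ckCorrect_last_open (u : List Char) (h : u.getLast? = some '(') : ckCorrect u = false := by
  rcases List.eq_nil_or_concat u with rfl | ⟨ys, y, rfl⟩
  · simp at h
  · have hy : y = '(' := by simpa using h
    subst hy
    simp [ckCorrect, List.foldl_append, ckStep]

-- aReverse is map flipChar
theorem aReverse_eq_map (s : List Char) : aReverse s = s.map flipChar := by
  simpa [aReverse, flipChar] using
    PySem.List.foldl_append_singleton_eq_map (fun c => if c = '(' then ')' else '(') s []

-- main equivalence on lists, by strong induction on length
theorem mainL : ∀ (n : Nat) (l : List Char), l.length ≤ n → balOf l = 0 →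
    aTransL l = (bChunks l 0 []).foldr bStep [] := by
  intro n
  induction n with
  | zero =>
    intro l hl _
    have : l = [] := List.eq_nil_of_length_eq_zero (by omega)
    subst this; simp [aTransL, bChunks]
  | succ n ihn =>
    intro l hl hbal
    by_cases hnil : l = []
    · subst hnil; simp [aTransL, bChunks]
    · rw [aTransL, if_neg hnil]
      have hcuts := aCuts_ne_nil l 0 0 hnil (by omega)
      cases hc : aCuts l 0 0 with
      | nil => exact absurd hc hcuts
      | cons p tl =>
        obtain ⟨hp0, hple, hbalu, hmin⟩ := aCuts_head_spec l 0 0 p tl hc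
        simp only [Nat.sub_zero, zero_add] at hple hbalu hmin
        set u := l.take p with hu
        set v := l.drop p with hv
        have hpos : 0 < p := hp0
        have hlv : v.length < l.length := by
          simp [hv, List.length_drop]
          have : 0 < l.length := List.length_pos_iff.2 hnil
          omega
        have hbalv : balOf v = 0 := by
          have : balOf u + balOf v = balOf l := by rw [← balOf_append]; simp [hu, hv]
          omega
        have hIH : aTransL v = (bChunks v 0 []).foldr bStep [] :=
          ihn v (by omega) hbalv
        rw [bChunks_split l 0 0 p tl [] hc]
        simp only [Nat.sub_zero, List.nil_append, List.foldr_cons, ← hu, ← hv, ← hIH]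
        -- prefix balances of u inside l
        have htake : ∀ j, j ≤ p → u.take j = l.take j := by
          intro j hj; simp [hu, List.take_take, Nat.min_eq_left hj]
        have hlenu : u.length = p := by
          simp [hu, List.length_take, Nat.min_eq_left hple]
        have hstep : ∀ j, j + 1 ≤ p →
            balOf (u.take (j + 1)) ≤ balOf (u.take j) + 1 ∧
            balOf (u.take j) - 1 ≤ balOf (u.take (j + 1)) := by
          intro j hj
          have hjlt : j < u.length := by omega
          have := balOf_take_succ u j hjlt
          have hpc : pcnt u[j] ≤ 1 ∧ -1 ≤ pcnt u[j] := by
            simp only [pcnt]; split_ifs <;> omega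
          omega
        have hne : ∀ j, 1 ≤ j → j < p → balOf (u.take j) ≠ 0 := by
          intro j h1 h2
          rw [htake j (by omega)]
          exact hmin j h1 h2
        have hbu0 : balOf (u.take 0) = 0 := by simp [balOf]
        have hbup : balOf (u.take p) = 0 := by
          rw [htake p le_rfl]; omega
        -- case on the first character of u
        have hune : u ≠ [] := by
          intro h; rw [h] at hlenu; simp at hlenu; omega
        cases huc : u with
        | nil => exact absurd huc hune
        | cons c0 urest =>
          have hb1 : balOf (u.take 1) = pcnt c0 := by
            simp [huc, balOf, List.take_succ_cons]
          by_cases hc0 : c0 = '('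
          · -- correct chunk
            have h1 : balOf (u.take 1) = 1 := by rw [hb1, hc0]; simp [pcnt]
            have hposj : ∀ j, 1 ≤ j → j < p → 1 ≤ balOf (u.take j) :=
              chunkSign_pos p (fun j => balOf (u.take j)) h1 hstep hne
            have hck : ckCorrect u = true := by
              apply ckCorrect_of_nonneg u (by rw [← hlenu] at hbup; simpa using hbup)
              intro j hj
              rw [hlenu] at hj
              rcases Nat.eq_or_lt_of_le hj with rfl | hjlt
              · omega
              · match j with
                | 0 => omega
                | Nat.succ k =>
                  show 0 ≤ balOf (u.take (k + 1))
                  have := hposj (k + 1) (by omega) hjlt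
                  omega
            have hhd : (c0 :: urest).head? ≠ some ')' := by simp [hc0]
            rw [huc] at hck
            rw [hck]
            simp [bStep, hc0]
          · by_cases hc0' : c0 = ')'
            · -- incorrect chunk: starts with ')', must end with '('
              have h1 : balOf (u.take 1) = -1 := by rw [hb1, hc0']; simp [pcnt]
              have hp2 : 2 ≤ p := by
                by_contra h
                have hp1 : p = 1 := by omega
                rw [hp1] at hbup; rw [hbup] at h1; omega
              have hnegj : ∀ j, 1 ≤ j → j < p → balOf (u.take j) ≤ -1 :=
                chunkSign_neg p (fun j => balOf (u.take j)) h1 hstep hne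
              have hlast : u.getLast? = some '(' := by
                have hplt : p - 1 < u.length := by omega
                have := balOf_take_succ u (p - 1) hplt
                have hsp : p - 1 + 1 = p := by omega
                rw [hsp] at this
                have hm1 : balOf (u.take (p - 1)) ≤ -1 := hnegj (p - 1) (by omega) (by omega)
                have hm1' : -1 ≤ balOf (u.take (p - 1)) := by
                  have hpc : pcnt u[p-1] ≤ 1 := by simp only [pcnt]; split_ifs <;> omega
                  omega
                have hpceq : pcnt u[p - 1] = 1 := by omega
                have hch : u[p - 1] = '(' := by
                  by_contra hch
                  simp [pcnt, hch] at hpceq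
                  split_ifs at hpceq <;> omega
                rw [List.getLast?_eq_getElem?, List.getElem?_eq_getElem (by omega)]
                simp [hlenu, hch]
              have hck : ckCorrect u = false := ckCorrect_last_open u hlast
              have hhd : (c0 :: urest).head? = some ')' := by simp [hc0']
              rw [huc] at hck
              rw [hck]
              simp [bStep, hc0', aReverse_eq_map]
            · -- non-paren first char: minimal chunk of length 1
              have h1 : balOf (u.take 1) = 0 := by rw [hb1]; simp [pcnt, hc0, hc0']
              have hp1 : p = 1 := by
                by_contra h
                exact hne 1 le_rfl (by omega) h1
              have hur : urest = [] := by
                have := hlenu; rw [huc] at this; simp [hp1] at this; exact this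
              subst hur
              have hck : ckCorrect [c0] = true := by
                simp [ckCorrect, ckStep, hc0]
              have hhd : [c0].head? ≠ some ')' := by simp [hc0']
              rw [hck]
              simp [bStep, hc0']

-- ===== VERDICT (by name: the statement is the Claim_ definition above) =====
theorem trans_to_cor_spec : Claim_equal_trans_to_cor := by
  intro w _ hpre
  unfold Spec_trans_to_cor trans_to_cor trans_to_cor_alt
  rw [mainL w.toList.length w.toList le_rfl hpre]
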